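-- pv_equiv track=rewrite | github.com/bdis-q/DQTetris | methods/AutoComm/gate_util.py | remove_repeated_gates
-- ===== SOURCE A (Python) =====
-- def is_equal_gate(g0, g1): return g0 == g1
--
-- def remove_repeated_gates(gate_list):
--     n_gate = len(gate_list)
--     gate_del_flag = [0 for i in range(n_gate)]
--     new_gate_list = []
--     for gidx0, g0 in enumerate(gate_list):
--         if gate_del_flag[gidx0] == 0:
--             for gidx1 in range(gidx0+1, n_gate):
--                 g1 = gate_list[gidx1]
--                 if is_equal_gate(g0, g1):
--                     gate_del_flag[gidx0] = 1
--                     gate_del_flag[gidx1] = 1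
--                     break
--             if gate_del_flag[gidx0] == 0:
--                 new_gate_list.append(g0)
--     return new_gate_list
-- ===== SOURCE B (Python) =====
-- def remove_repeated_gates(gate_list):
--     # One forward pass: toggle membership in a list of currently-unmatched gates.
--     pending = []
--     for g in gate_list:
--         if g in pending:
--             pending.remove(g)
--         else:
--             pending.append(g)
--     return pending
-- ===== Notes on version B (the rewrite author's own statement) =====
-- stated objective: simpler
-- what changed: Replaces the flag-array with a nested forward scan per gate by a single pass that toggles each gate in/out of a 'pending' list of currently-unmatched gates.
import Mathlib
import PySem

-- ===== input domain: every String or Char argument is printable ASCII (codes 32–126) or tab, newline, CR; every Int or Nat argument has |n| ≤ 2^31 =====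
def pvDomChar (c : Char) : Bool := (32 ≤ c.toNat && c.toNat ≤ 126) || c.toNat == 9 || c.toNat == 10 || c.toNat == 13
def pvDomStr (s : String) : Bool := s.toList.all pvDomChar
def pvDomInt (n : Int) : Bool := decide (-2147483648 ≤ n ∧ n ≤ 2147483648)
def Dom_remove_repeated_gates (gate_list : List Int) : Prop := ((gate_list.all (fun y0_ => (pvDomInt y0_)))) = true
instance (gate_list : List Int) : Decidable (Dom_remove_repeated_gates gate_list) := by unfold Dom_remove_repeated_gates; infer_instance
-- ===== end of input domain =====

-- B replaces A's flag-array with nested forward scans by a single pass toggling each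
-- gate in/out of a list of currently-unmatched gates (objective: simpler).

-- ===== PORT A =====
-- Python A mutates gate_del_flag only at the current index and at indices after it, and
-- never reads a flag of an already-processed index; so the port carries the remaining
-- suffix of (gate, flag) pairs as the loop state — same comparisons in the same order.

-- inner loop: scan forward for the first gate equal to g0, set its del-flag to 1 (break)
def pvMarkFirst (g0 : Int) : List (Int × Int) → Option (List (Int × Int))
  | [] => none
  | (g, f) :: rest =>
    if g = g0 then some ((g, (1 : Int)) :: rest)
    else (pvMarkFirst g0 rest).map (fun r => (g, f) :: r)

theorem pvMarkFirst_length (g0 : Int) : ∀ (s s' : List (Int × Int)),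
    pvMarkFirst g0 s = some s' → s'.length = s.length := by
  intro s
  induction s with
  | nil => intro s' h; simp [pvMarkFirst] at h
  | cons hd tl ih =>
    intro s' h
    obtain ⟨g, f⟩ := hd
    by_cases hg : g = g0
    · simp [pvMarkFirst, hg] at h; subst h; simp
    · simp only [pvMarkFirst, if_neg hg, Option.map_eq_some_iff] at h
      obtain ⟨r, hr, rfl⟩ := h
      simp [ih r hr]

-- outer loop: for each remaining (g0, flag); skip if flagged, else pair off or append
def pvOuterA (s : List (Int × Int)) (acc : List Int) : List Int :=
  match s with
  | [] => acc
  | (g0, f0) :: rest =>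
    if f0 = 0 then
      match h : pvMarkFirst g0 rest with
      | some rest' => pvOuterA rest' acc
      | none => pvOuterA rest (acc ++ [g0])
    else pvOuterA rest acc
termination_by s.length
decreasing_by
  · have := pvMarkFirst_length g0 rest _ h; simp [this]
  · simp
  · simp

def remove_repeated_gates (gate_list : List Int) : List Int :=
  pvOuterA (gate_list.map (fun g => (g, (0 : Int)))) []

-- ===== PORT B =====
-- one pass: toggle membership of g in the pending list (== membership, remove first occurrence)
def pvStep (pending : List Int) (g : Int) : List Int :=
  if pending.contains g then pending.erase g else pending ++ [g]

def remove_repeated_gates_alt (gate_list : List Int) : List Int :=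
  gate_list.foldl pvStep []

-- ===== PRECONDITION & SPEC =====
def Spec_remove_repeated_gates (gate_list : List Int) (out : List Int) : Prop := out = remove_repeated_gates_alt gate_list
instance (gate_list : List Int) (out : List Int) : Decidable (Spec_remove_repeated_gates gate_list out) := by unfold Spec_remove_repeated_gates; infer_instance

-- ===== CLAIM (what is proved, stated in full; the proofs are below) =====
def Claim_equal_remove_repeated_gates : Prop := ∀ (gate_list : List Int), Dom_remove_repeated_gates gate_list → Spec_remove_repeated_gates gate_list (remove_repeated_gates gate_list)

-- ===== LEMMAS AND PROOFS =====

-- canonical form: survivors are the values of odd multiplicity, each once,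
-- ordered by their last occurrence.
def lastDedup : List Int → List Int
  | [] => []
  | a :: t => if a ∈ t then lastDedup t else a :: lastDedup t

def Tfun (l : List Int) : List Int :=
  (lastDedup l).filter (fun x => l.count x % 2 == 1)

def map0 (l : List Int) : List (Int × Int) := l.map (fun g => (g, (0 : Int)))

def unflag (s : List (Int × Int)) : List Int :=
  (s.filter (fun p => p.2 == 0)).map Prod.fst

def InvA (s : List (Int × Int)) : Prop :=
  List.Pairwise (fun x y => x.1 = y.1 → y.2 ≠ 0 → x.2 ≠ 0) s

theorem pvOuterA_nil (acc : List Int) : pvOuterA [] acc = acc := by rw [pvOuterA]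

theorem pvOuterA_cons_flag (g f : Int) (rest : List (Int × Int)) (acc : List Int)
    (hf : f ≠ 0) : pvOuterA ((g, f) :: rest) acc = pvOuterA rest acc := by
  rw [pvOuterA]; simp [hf]

theorem pvOuterA_cons_some (g : Int) (rest rest' : List (Int × Int)) (acc : List Int)
    (h : pvMarkFirst g rest = some rest') :
    pvOuterA ((g, 0) :: rest) acc = pvOuterA rest' acc := by
  rw [pvOuterA]
  split
  · split
    next r heq => rw [h] at heq; injection heq with heq; rw [heq]
    next heq => rw [h] at heq; exact absurd heq (by simp)
  · next heq => exact absurd rfl heq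

theorem pvOuterA_cons_none (g : Int) (rest : List (Int × Int)) (acc : List Int)
    (h : pvMarkFirst g rest = none) :
    pvOuterA ((g, 0) :: rest) acc = pvOuterA rest (acc ++ [g]) := by
  rw [pvOuterA]
  split
  · split
    next r heq => rw [h] at heq; exact absurd heq (by simp)
    next heq => rfl
  · next heq => exact absurd rfl heq

theorem pvOuterA_acc : ∀ (n : Nat) (s : List (Int × Int)) (acc : List Int),
    s.length ≤ n → pvOuterA s acc = acc ++ pvOuterA s [] := by
  intro n
  induction n with
  | zero =>
    intro s acc hs
    have : s = [] := by cases s <;> simp_all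
    subst this; simp [pvOuterA_nil]
  | succ n ih =>
    intro s acc hs
    cases s with
    | nil => simp [pvOuterA_nil]
    | cons hd rest =>
      obtain ⟨g, f⟩ := hd
      have hlen : rest.length ≤ n := by simp at hs; omega
      by_cases hf : f = 0
      · subst hf
        cases hm : pvMarkFirst g rest with
        | none =>
          rw [pvOuterA_cons_none g rest acc hm, pvOuterA_cons_none g rest [] hm]
          rw [ih rest (acc ++ [g]) hlen, ih rest ([] ++ [g]) hlen]
          simp
        | some rest' =>
          have hlen' : rest'.length ≤ n := by rw [pvMarkFirst_length g rest rest' hm]; exact hlen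
          rw [pvOuterA_cons_some g rest rest' acc hm, pvOuterA_cons_some g rest rest' [] hm]
          exact ih rest' acc hlen'
      · rw [pvOuterA_cons_flag g f rest acc hf, pvOuterA_cons_flag g f rest [] hf]
        exact ih rest acc hlen
theorem pvMarkFirst_none (g0 : Int) : ∀ (s : List (Int × Int)),
    pvMarkFirst g0 s = none ↔ ∀ r ∈ s, r.1 ≠ g0 := by
  intro s
  induction s with
  | nil => simp [pvMarkFirst]
  | cons hd tl ih =>
    obtain ⟨g, f⟩ := hd
    by_cases hg : g = g0
    · simp [pvMarkFirst, hg]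
    · simp [pvMarkFirst, hg, ih]

theorem pvMarkFirst_some (g0 : Int) : ∀ (s s' : List (Int × Int)),
    pvMarkFirst g0 s = some s' →
    ∃ p f q, s = p ++ (g0, f) :: q ∧ s' = p ++ (g0, (1 : Int)) :: q ∧ ∀ r ∈ p, r.1 ≠ g0 := by
  intro s
  induction s with
  | nil => intro s' h; simp [pvMarkFirst] at h
  | cons hd tl ih =>
    intro s' h
    obtain ⟨g, f⟩ := hd
    by_cases hg : g = g0
    · subst hg
      simp [pvMarkFirst] at h
      exact ⟨[], f, tl, by simp, by simp [← h], by simp⟩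
    · simp only [pvMarkFirst, if_neg hg, Option.map_eq_some_iff] at h
      obtain ⟨r, hr, rfl⟩ := h
      obtain ⟨p, f', q, h1, h2, h3⟩ := ih r hr
      refine ⟨(g, f) :: p, f', q, by simp [h1], by simp [h2], ?_⟩
      intro x hx
      rcases List.mem_cons.mp hx with h | h
      · subst h; exact hg
      · exact h3 x h

theorem unflag_append (s t : List (Int × Int)) :
    unflag (s ++ t) = unflag s ++ unflag t := by
  simp [unflag]

theorem unflag_cons0 (g : Int) (s : List (Int × Int)) :
    unflag ((g, 0) :: s) = g :: unflag s := by
  simp [unflag]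

theorem unflag_cons1 (g f : Int) (s : List (Int × Int)) (hf : f ≠ 0) :
    unflag ((g, f) :: s) = unflag s := by
  simp [unflag, hf]

theorem unflag_map0 (l : List Int) : unflag (map0 l) = l := by
  induction l with
  | nil => rfl
  | cons a t ih => simp [map0, unflag] at ih ⊢; exact ih

theorem not_mem_unflag (g : Int) (p : List (Int × Int)) (hp : ∀ r ∈ p, r.1 ≠ g) :
    g ∉ unflag p := by
  simp only [unflag, List.mem_map, List.mem_filter]
  rintro ⟨r, ⟨hr, -⟩, hr1⟩
  exact hp r hr hr1

theorem unflag_length (s : List (Int × Int)) : (unflag s).length ≤ s.length := by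
  simp only [unflag, List.length_map]
  exact List.length_filter_le _ _
theorem invA_of_all_zero (s : List (Int × Int)) (h : ∀ r ∈ s, r.2 = 0) : InvA s := by
  apply List.pairwise_of_forall_mem_list
  intro x _ y hy _ hy2
  exact absurd (h y hy) hy2

theorem invA_tail (x : Int × Int) (s : List (Int × Int)) (h : InvA (x :: s)) : InvA s :=
  (List.pairwise_cons.mp h).2

theorem invA_head_zero (g : Int) (s : List (Int × Int)) (h : InvA ((g, 0) :: s)) :
    ∀ y ∈ s, y.1 = g → y.2 = 0 := by
  intro y hy h1
  by_contra h2
  exact ((List.pairwise_cons.mp h).1 y hy h1.symm h2) rfl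

theorem invA_update (g f₂ : Int) (p q : List (Int × Int))
    (hInv : InvA (p ++ (g, f₂) :: q)) (hp : ∀ r ∈ p, r.1 ≠ g) :
    InvA (p ++ (g, (1 : Int)) :: q) := by
  rw [InvA, List.pairwise_append] at hInv ⊢
  obtain ⟨h1, h2, h3⟩ := hInv
  rw [List.pairwise_cons] at h2 ⊢
  refine ⟨h1, ⟨fun y hy _ _ => by simp, h2.2⟩, ?_⟩
  intro x hx y hy
  rcases List.mem_cons.mp hy with rfl | hy'
  · exact fun h1' _ => absurd h1' (hp x hx)
  · exact h3 x hx y (List.mem_cons_of_mem _ hy')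

theorem invA_marked (g : Int) (u₁ u₂ : List Int) (hg : g ∉ u₁) :
    InvA (map0 u₁ ++ (g, (1 : Int)) :: map0 u₂) := by
  have hz : ∀ (u : List Int), ∀ r ∈ map0 u, r.2 = (0 : Int) := by
    intro u r hr
    simp only [map0, List.mem_map] at hr
    obtain ⟨a, -, rfl⟩ := hr; rfl
  rw [InvA, List.pairwise_append]
  refine ⟨invA_of_all_zero _ (hz u₁), ?_, ?_⟩
  · rw [List.pairwise_cons]
    refine ⟨fun y hy _ _ => by simp, invA_of_all_zero _ (hz u₂)⟩
  · intro x hx y hy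
    rcases List.mem_cons.mp hy with rfl | hy'
    · intro h1 _
      exfalso
      simp only [map0, List.mem_map] at hx
      obtain ⟨a, ha, rfl⟩ := hx
      have hag : a = g := h1
      exact hg (hag ▸ ha)
    · exact fun _ h2 => absurd (hz u₂ y hy') h2

theorem map0_cons (a : Int) (l : List Int) : map0 (a :: l) = (a, 0) :: map0 l := rfl

theorem pvMarkFirst_map0 (g : Int) (u₁ u₂ : List Int) (hg : g ∉ u₁) :
    pvMarkFirst g (map0 (u₁ ++ g :: u₂)) = some (map0 u₁ ++ (g, (1 : Int)) :: map0 u₂) := by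
  induction u₁ with
  | nil => simp [map0, pvMarkFirst]
  | cons a t ih =>
    have ha : a ≠ g := fun h => hg (h ▸ List.mem_cons_self)
    have ht : g ∉ t := fun h => hg (List.mem_cons_of_mem _ h)
    rw [List.cons_append, map0_cons, map0_cons]
    rw [pvMarkFirst, if_neg ha, ih ht]
    rfl
theorem first_occ_split (a : Int) : ∀ (t : List Int), a ∈ t →
    ∃ u₁ u₂, t = u₁ ++ a :: u₂ ∧ a ∉ u₁ := by
  intro t
  induction t with
  | nil => intro h; simp at h
  | cons b t ih =>
    intro h
    by_cases hb : b = a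
    · exact ⟨[], t, by simp [hb], by simp⟩
    · have : a ∈ t := by rcases List.mem_cons.mp h with h' | h'; exact absurd h'.symm hb; exact h'
      obtain ⟨u₁, u₂, h1, h2⟩ := ih this
      refine ⟨b :: u₁, u₂, by simp [h1], ?_⟩
      simp only [List.mem_cons, not_or]
      exact ⟨fun h => hb h.symm, h2⟩

-- flagged entries are transparent: under the invariant, running A's outer loop on a state
-- equals running it on the unflagged entries alone
theorem outerA_unflag : ∀ (n : Nat) (s : List (Int × Int)), s.length ≤ n → InvA s →
    pvOuterA s [] = pvOuterA (map0 (unflag s)) [] := by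
  intro n
  induction n with
  | zero =>
    intro s hs _
    have : s = [] := by cases s <;> simp_all
    subst this; simp [unflag, map0]
  | succ n ih =>
    intro s hs hInv
    cases s with
    | nil => simp [unflag, map0]
    | cons hd rest =>
      obtain ⟨g, f⟩ := hd
      have hlen : rest.length ≤ n := by simp at hs; omega
      have hInvR : InvA rest := invA_tail _ _ hInv
      by_cases hf : f = 0
      · subst hf
        have hhead := invA_head_zero g rest hInv
        cases hm : pvMarkFirst g rest with
        | none =>
          have hng : ∀ r ∈ rest, r.1 ≠ g := (pvMarkFirst_none g rest).mp hm
          have hnu : g ∉ unflag rest := not_mem_unflag g rest hng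
          have hmm : pvMarkFirst g (map0 (unflag rest)) = none := by
            rw [pvMarkFirst_none]
            intro r hr
            simp only [map0, List.mem_map] at hr
            obtain ⟨x, hx, rfl⟩ := hr
            exact fun h => hnu (h ▸ hx)
          rw [pvOuterA_cons_none g rest [] hm, unflag_cons0, map0_cons,
            pvOuterA_cons_none g (map0 (unflag rest)) [] hmm]
          rw [pvOuterA_acc n rest ([] ++ [g]) hlen,
            pvOuterA_acc n (map0 (unflag rest)) ([] ++ [g]) (le_trans (by simpa [map0] using unflag_length rest) hlen)]
          rw [ih rest hlen hInvR]
        | some rest' =>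
          obtain ⟨p, f₂, q, hsplit, hrest', hp⟩ := pvMarkFirst_some g rest rest' hm
          have hf₂ : f₂ = 0 := hhead (g, f₂) (hsplit ▸ (by simp)) rfl
          subst hf₂
          -- unflag computations
          have hur : unflag rest = unflag p ++ g :: unflag q := by
            rw [hsplit, unflag_append, unflag_cons0]
          have hur' : unflag rest' = unflag p ++ unflag q := by
            rw [hrest', unflag_append, unflag_cons1 g 1 q (by norm_num)]
          have hgp : g ∉ unflag p := not_mem_unflag g p hp
          -- left side
          have hInv' : InvA rest' := by
            rw [hrest']; exact invA_update g 0 p q (hsplit ▸ hInvR) hp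
          have hlen' : rest'.length ≤ n := by
            rw [pvMarkFirst_length g rest rest' hm]; exact hlen
          rw [pvOuterA_cons_some g rest rest' [] hm, ih rest' hlen' hInv', hur']
          -- right side
          rw [unflag_cons0, map0_cons, hur]
          have hmm := pvMarkFirst_map0 g (unflag p) (unflag q) hgp
          rw [show map0 (unflag p ++ g :: unflag q) = map0 (unflag p ++ g :: unflag q) from rfl] at hmm
          rw [pvOuterA_cons_some g _ _ [] hmm]
          -- apply ih to the marked zero-state
          have hlenm : (map0 (unflag p) ++ (g, (1:Int)) :: map0 (unflag q)).length ≤ n := by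
            have h1 : (unflag p).length ≤ p.length := unflag_length p
            have h2 : (unflag q).length ≤ q.length := unflag_length q
            have h3 : rest.length = p.length + 1 + q.length := by simp [hsplit]; omega
            simp only [List.length_append, List.length_cons, map0, List.length_map]
            omega
          have hInvm : InvA (map0 (unflag p) ++ (g, (1:Int)) :: map0 (unflag q)) :=
            invA_marked g (unflag p) (unflag q) hgp
          rw [ih _ hlenm hInvm]
          have hum : unflag (map0 (unflag p) ++ (g, (1:Int)) :: map0 (unflag q))
              = unflag p ++ unflag q := by
            rw [unflag_append, unflag_cons1 g 1 _ (by norm_num), unflag_map0, unflag_map0]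
          rw [hum]
      · rw [pvOuterA_cons_flag g f rest [] hf, unflag_cons1 g f rest hf]
        exact ih rest hlen hInvR
theorem mem_lastDedup (x : Int) : ∀ (l : List Int), x ∈ lastDedup l ↔ x ∈ l := by
  intro l
  induction l with
  | nil => simp [lastDedup]
  | cons a t ih =>
    by_cases h : a ∈ t
    · rw [lastDedup, if_pos h]
      simp only [List.mem_cons, ih]
      constructor
      · exact Or.inr
      · rintro (rfl | hx); exact h; exact hx
    · rw [lastDedup, if_neg h]
      simp [ih]

theorem nodup_lastDedup : ∀ (l : List Int), (lastDedup l).Nodup := by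
  intro l
  induction l with
  | nil => simp [lastDedup]
  | cons a t ih =>
    by_cases h : a ∈ t
    · rw [lastDedup, if_pos h]; exact ih
    · rw [lastDedup, if_neg h]
      exact List.Nodup.cons (fun hx => h ((mem_lastDedup a t).mp hx)) ih

theorem lastDedup_erase (a : Int) : ∀ (t : List Int), a ∈ t →
    lastDedup (t.erase a) = if a ∈ t.erase a then lastDedup t
      else (lastDedup t).filter (fun y => y ≠ a) := by
  intro t
  induction t with
  | nil => intro h; simp at h
  | cons b t ih =>
    intro h
    by_cases hb : b = a
    · subst hb
      rw [List.erase_cons_head]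
      by_cases ht : b ∈ t
      · rw [if_pos ht, lastDedup, if_pos ht]
      · rw [if_neg ht, lastDedup, if_neg ht]
        have : (lastDedup t).filter (fun y => y ≠ b) = lastDedup t := by
          apply List.filter_eq_self.mpr
          intro x hx
          have : x ∈ t := (mem_lastDedup x t).mp hx
          simp only [decide_eq_true_eq]
          exact fun hxa => ht (hxa ▸ this)
        rw [List.filter_cons_of_neg (by simp), this]
    · have hat : a ∈ t := by rcases List.mem_cons.mp h with h' | h'; exact absurd h'.symm hb; exact h'
      rw [List.erase_cons_tail (by simp [hb])]
      have hmem : b ∈ t.erase a ↔ b ∈ t := by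
        constructor
        · exact fun hx => List.mem_of_mem_erase hx
        · exact fun hx => List.mem_erase_of_ne hb |>.mpr hx
      have hmema : (a ∈ b :: t.erase a) = (a ∈ t.erase a) := by
        simp only [eq_iff_iff, List.mem_cons]
        constructor
        · rintro (h' | h')
          · exact absurd h'.symm hb
          · exact h'
        · exact Or.inr
      rw [lastDedup]
      by_cases hbe : b ∈ t.erase a
      · rw [if_pos hbe, ih hat]; simp only [hmema]
        by_cases hae : a ∈ t.erase a
        · rw [if_pos hae, if_pos hae, lastDedup, if_pos (hmem.mp hbe)]
        · rw [if_neg hae, if_neg hae, lastDedup, if_pos (hmem.mp hbe)]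
      · rw [if_neg hbe, ih hat]; simp only [hmema]
        have hbt : b ∉ t := fun hx => hbe (hmem.mpr hx)
        by_cases hae : a ∈ t.erase a
        · rw [if_pos hae, if_pos hae, lastDedup, if_neg hbt]
        · rw [if_neg hae, if_neg hae, lastDedup, if_neg hbt,
            List.filter_cons_of_pos (by simp [hb])]
theorem Tfun_cons (a : Int) (t : List Int) :
    Tfun (a :: t) = if a ∈ t then Tfun (t.erase a) else a :: Tfun t := by
  by_cases h : a ∈ t
  · rw [if_pos h]
    unfold Tfun
    rw [lastDedup, if_pos h, lastDedup_erase a t h]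
    have hcnt : ∀ y : Int, ((a :: t).count y % 2 == 1) = ((t.erase a).count y % 2 == 1) := by
      intro y
      by_cases hy : y = a
      · subst hy
        have hc : 1 ≤ List.count y t := List.count_pos_iff.mpr h
        rw [List.count_cons, List.count_erase]
        simp only [BEq.rfl, if_pos]
        have : (List.count y t + 1) % 2 = (List.count y t - 1) % 2 := by omega
        rw [this]
      · have hba : (a == y) = false := beq_eq_false_iff_ne.mpr (fun h' => hy h'.symm)
        rw [List.count_cons, List.count_erase, hba]
        simp
    by_cases hae : a ∈ t.erase a
    · rw [if_pos hae]
      exact List.filter_congr (fun x _ => hcnt x)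
    · rw [if_neg hae, List.filter_filter]
      apply List.filter_congr
      intro x hx
      by_cases hxa : x = a
      · subst hxa
        have hc1 : List.count x (t.erase x) = 0 := List.count_eq_zero.mpr hae
        have hc : 1 ≤ List.count x t := List.count_pos_iff.mpr h
        have hc2 : List.count x t = 1 := by
          rw [List.count_erase] at hc1; simp at hc1; omega
        rw [List.count_cons]
        simp [hc2]
      · rw [hcnt x]
        simp [hxa]
  · rw [if_neg h]
    unfold Tfun
    rw [lastDedup, if_neg h, List.filter_cons]
    have hc0 : List.count a t = 0 := List.count_eq_zero.mpr h
    rw [if_pos (by simp [hc0])]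
    congr 1
    apply List.filter_congr
    intro x hx
    have hxt : x ∈ t := (mem_lastDedup x t).mp hx
    have hxa : (a == x) = false := beq_eq_false_iff_ne.mpr (fun h' => h (h' ▸ hxt))
    rw [List.count_cons, hxa]
    simp
theorem A0_cons (a : Int) (t : List Int) :
    pvOuterA (map0 (a :: t)) [] =
      if a ∈ t then pvOuterA (map0 (t.erase a)) [] else a :: pvOuterA (map0 t) [] := by
  rw [map0_cons]
  by_cases h : a ∈ t
  · rw [if_pos h]
    obtain ⟨u₁, u₂, h1, h2⟩ := first_occ_split a t h
    subst h1
    have hmm := pvMarkFirst_map0 a u₁ u₂ h2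
    rw [pvOuterA_cons_some a _ _ [] hmm]
    rw [outerA_unflag (map0 u₁ ++ (a, (1:Int)) :: map0 u₂).length _ le_rfl
      (invA_marked a u₁ u₂ h2)]
    have hum : unflag (map0 u₁ ++ (a, (1:Int)) :: map0 u₂) = u₁ ++ u₂ := by
      rw [unflag_append, unflag_cons1 a 1 _ (by norm_num), unflag_map0, unflag_map0]
    have her : (u₁ ++ a :: u₂).erase a = u₁ ++ u₂ := by
      rw [List.erase_append_right _ h2, List.erase_cons_head]
    rw [hum, her]
  · rw [if_neg h]
    have hmm : pvMarkFirst a (map0 t) = none := by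
      rw [pvMarkFirst_none]
      intro r hr
      simp only [map0, List.mem_map] at hr
      obtain ⟨x, hx, rfl⟩ := hr
      exact fun h' => h (h' ▸ hx)
    rw [pvOuterA_cons_none a _ [] hmm,
      pvOuterA_acc (map0 t).length (map0 t) ([] ++ [a]) le_rfl]
    simp

theorem A0_eq_T : ∀ (n : Nat) (l : List Int), l.length ≤ n → pvOuterA (map0 l) [] = Tfun l := by
  intro n
  induction n with
  | zero =>
    intro l hl
    have : l = [] := by cases l <;> simp_all
    subst this
    simp [map0, pvOuterA_nil, Tfun, lastDedup]
  | succ n ih =>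
    intro l hl
    cases l with
    | nil => simp [map0, pvOuterA_nil, Tfun, lastDedup]
    | cons a t =>
      rw [A0_cons, Tfun_cons]
      by_cases h : a ∈ t
      · rw [if_pos h, if_pos h]
        apply ih
        have := List.length_erase_of_mem h
        simp at hl
        omega
      · rw [if_neg h, if_neg h, ih t (by simp at hl; omega)]

theorem lastDedup_snoc (x : Int) : ∀ (l : List Int),
    lastDedup (l ++ [x]) = (lastDedup l).filter (fun y => y ≠ x) ++ [x] := by
  intro l
  induction l with
  | nil => simp [lastDedup]
  | cons a l ih =>
    rw [List.cons_append, lastDedup]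
    by_cases hal : a ∈ l
    · rw [if_pos (List.mem_append_left _ hal), ih, lastDedup, if_pos hal]
    · by_cases hax : a = x
      · rw [if_pos (by simp [hax]), ih, lastDedup, if_neg hal,
          List.filter_cons_of_neg (by simp [hax])]
      · rw [if_neg (by simp [hal, hax]), ih, lastDedup, if_neg hal,
          List.filter_cons_of_pos (by simp [hax])]
        rfl

theorem pvStep_T (l : List Int) (x : Int) : pvStep (Tfun l) x = Tfun (l ++ [x]) := by
  have hmemT : x ∈ Tfun l ↔ List.count x l % 2 = 1 := by
    unfold Tfun
    rw [List.mem_filter, mem_lastDedup]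
    constructor
    · intro ⟨_, h2⟩; simpa using h2
    · intro h
      refine ⟨List.count_pos_iff.mp (by omega), by simpa using h⟩
  have hcnt : ∀ y : Int, y ≠ x → List.count y (l ++ [x]) = List.count y l := by
    intro y hy
    rw [List.count_append, List.count_cons]
    simp [beq_eq_false_iff_ne.mpr (fun h' => hy h'.symm)]
  have hcx : List.count x (l ++ [x]) = List.count x l + 1 := by
    rw [List.count_append, List.count_cons]
    simp
  unfold pvStep
  by_cases hx : x ∈ Tfun l
  · rw [if_pos (by rwa [List.contains_iff_mem])]
    have hodd : List.count x l % 2 = 1 := hmemT.mp hx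
    have hnd : (Tfun l).Nodup := (nodup_lastDedup l).filter _
    rw [hnd.erase_eq_filter x]
    unfold Tfun
    rw [lastDedup_snoc, List.filter_append, List.filter_filter, List.filter_filter]
    rw [List.filter_cons_of_neg (by simp; omega), List.filter_nil, List.append_nil]
    apply List.filter_congr
    intro y hy
    by_cases hyx : y = x
    · subst hyx; simp
    · rw [hcnt y hyx]
      simp [hyx]
  · rw [if_neg (by rwa [List.contains_iff_mem])]
    have heven : List.count x l % 2 = 0 := by
      by_cases hxl : x ∈ l
      · have hne : ¬ List.count x l % 2 = 1 := fun hc => hx (hmemT.mpr hc)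
        omega
      · simp [List.count_eq_zero.mpr hxl]
    unfold Tfun
    rw [lastDedup_snoc, List.filter_append, List.filter_filter]
    rw [List.filter_cons_of_pos (by simp; omega), List.filter_nil]
    congr 1
    apply List.filter_congr
    intro y hy
    by_cases hyx : y = x
    · subst hyx
      have h0 : (List.count y l % 2 == 1) = false := by rw [heven]; rfl
      simp [h0]
    · rw [hcnt y hyx]
      simp [hyx]

theorem B_eq_T (l : List Int) : l.foldl pvStep [] = Tfun l := by
  induction l using List.reverseRecOn with
  | nil => simp [Tfun, lastDedup]
  | append_singleton l x ih =>
    rw [List.foldl_append, List.foldl_cons, List.foldl_nil, ih, pvStep_T]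

theorem A_eq_B (gate_list : List Int) :
    remove_repeated_gates gate_list = remove_repeated_gates_alt gate_list := by
  show pvOuterA (map0 gate_list) [] = gate_list.foldl pvStep []
  rw [B_eq_T]
  exact A0_eq_T gate_list.length gate_list le_rfl

-- ===== VERDICT (by name: the statement is the Claim_ definition above) =====
theorem remove_repeated_gates_spec : Claim_equal_remove_repeated_gates := by
  intro gate_list _
  unfold Spec_remove_repeated_gates
  exact A_eq_B gate_list
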